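-- pv_equiv track=rewrite | github.com/IIP-Sogang/olkavs-avspeech | avsr/utils/metric.py | get_space_tokenized_text
-- ===== SOURCE A (Python) =====
-- def get_space_tokenized_text(text):
--     tokens = []
--     text = list(text)
--     while text:
--         token = text.pop(0)
--         if token==' ':
--             if len(text)!=0:
--                 tokens.append(token+text.pop(0))
--             else: pass
--         else:
--             tokens.append(token)
--     return tokens
-- ===== SOURCE B (Python) =====
-- import re
--
-- def get_space_tokenized_text(text):
--     return re.findall(r' .|[^ ]', text, re.S)
-- ===== Notes on version B (the rewrite author's own statement) =====
-- stated objective: faster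
-- what changed: Replaces the destructive pop(0) while-loop (quadratic list shifting) with a single C-level regex findall whose two-branch alternation (space-plus-any-char, then single non-space) yields exactly the same tokens, including dropping a trailing lone space.
import Mathlib
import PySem

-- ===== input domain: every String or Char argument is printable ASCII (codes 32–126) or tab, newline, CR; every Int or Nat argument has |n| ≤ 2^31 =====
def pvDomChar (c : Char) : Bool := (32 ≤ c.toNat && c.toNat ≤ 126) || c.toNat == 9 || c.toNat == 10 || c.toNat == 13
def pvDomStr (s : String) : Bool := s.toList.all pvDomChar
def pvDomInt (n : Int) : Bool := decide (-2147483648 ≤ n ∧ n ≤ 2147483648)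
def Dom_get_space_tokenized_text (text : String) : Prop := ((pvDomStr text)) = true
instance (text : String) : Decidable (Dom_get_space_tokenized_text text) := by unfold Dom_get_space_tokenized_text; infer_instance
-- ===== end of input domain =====

-- B replaces A's destructive pop(0) while-loop with one regex findall (' .|[^ ]', DOTALL); same tokens, including dropping a trailing lone space.

-- ===== PORT A =====
-- A's while-loop over the mutable char list: pop(0) the token; if it is a space and
-- the remaining list is nonempty, pop(0) again and append the two-char token; else append it.
def pyAloop : List Char → List String
  | [] => []
  | token :: text =>
    if token = ' ' then
      if text.length ≠ 0 then
        -- token + text.pop(0)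
        String.ofList [token, text.head!] :: pyAloop text.tail
      else
        pyAloop text    -- pass; the loop continues with text = []
    else
      String.ofList [token] :: pyAloop text
termination_by l => l.length
decreasing_by all_goals simp [List.length_tail]

def get_space_tokenized_text (text : String) : List String := pyAloop text.toList

-- ===== PORT B =====
-- Source B: `re.findall(r' .|[^ ]', text, re.S)`. `reMatch` tries the alternation at one
-- position (first branch ' .', DOTALL so any following char; then branch [^ ]);
-- `reFindall` repeats the match over the rest of the string, as findall does.
def reMatch : List Char → Option (String × List Char)
  | [] => none
  | c :: rest =>
    if c = ' ' then
      match rest with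
      | [] => none                                         -- a final lone space matches neither branch
      | d :: rest' => some (String.ofList [' ', d], rest') -- branch ' .'
    else
      some (String.ofList [c], rest)                       -- branch [^ ]

theorem reMatch_length {l r : List Char} {t : String} (h : reMatch l = some (t, r)) :
    r.length < l.length := by
  match l with
  | [] => simp [reMatch] at h
  | c :: rest =>
    by_cases hc : c = ' '
    · subst hc
      match rest with
      | [] => simp [reMatch] at h
      | d :: rest' =>
        simp [reMatch] at h
        obtain ⟨-, hr⟩ := h
        subst hr; simp
    · simp [reMatch, hc] at h
      obtain ⟨-, hr⟩ := h
      subst hr; simp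

def reFindall (l : List Char) : List String :=
  match h : reMatch l with
  | none => []
  | some (tok, rest) => tok :: reFindall rest
termination_by l.length
decreasing_by exact reMatch_length h

def get_space_tokenized_text_alt (text : String) : List String := reFindall text.toList

-- ===== PRECONDITION & SPEC =====
def Spec_get_space_tokenized_text (text : String) (out : List String) : Prop := out = get_space_tokenized_text_alt text
instance (text : String) (out : List String) : Decidable (Spec_get_space_tokenized_text text out) := by unfold Spec_get_space_tokenized_text; infer_instance

-- ===== CLAIM (what is proved, stated in full; the proofs are below) =====
def Claim_equal_get_space_tokenized_text : Prop := ∀ (text : String), Dom_get_space_tokenized_text text → Spec_get_space_tokenized_text text (get_space_tokenized_text text)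

-- ===== LEMMAS AND PROOFS =====
theorem reFindall_none {l : List Char} (h : reMatch l = none) : reFindall l = [] := by
  rw [reFindall.eq_def]
  split <;> simp_all

theorem reFindall_some {l r : List Char} {t : String} (h : reMatch l = some (t, r)) :
    reFindall l = t :: reFindall r := by
  rw [reFindall.eq_def]
  split <;> simp_all

theorem pyAloop_eq_reFindall : ∀ (n : ℕ) (l : List Char), l.length ≤ n → pyAloop l = reFindall l := by
  intro n
  induction n with
  | zero =>
    intro l hl
    have : l = [] := List.eq_nil_of_length_eq_zero (Nat.le_zero.mp hl)
    subst this
    rw [pyAloop, reFindall_none (by simp [reMatch])]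
  | succ n ih =>
    intro l hl
    match l with
    | [] => rw [pyAloop, reFindall_none (by simp [reMatch])]
    | c :: rest =>
      simp only [List.length_cons, Nat.add_le_add_iff_right] at hl
      by_cases hc : c = ' '
      · subst hc
        match rest with
        | [] =>
          rw [pyAloop, reFindall_none (by simp [reMatch])]
          simp [pyAloop]
        | d :: rest' =>
          have hm : reMatch (' ' :: d :: rest') = some (String.ofList [' ', d], rest') := by
            simp [reMatch]
          rw [pyAloop, reFindall_some hm]
          have hrec := ih rest' (by simp at hl; omega)
          simp [List.head!, hrec]
      · have hm : reMatch (c :: rest) = some (String.ofList [c], rest) := by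
          simp [reMatch, hc]
        rw [pyAloop, reFindall_some hm]
        rw [if_neg hc]
        exact congrArg _ (ih rest hl)

-- ===== VERDICT (by name: the statement is the Claim_ definition above) =====
theorem get_space_tokenized_text_spec : Claim_equal_get_space_tokenized_text := by
  intro text _
  unfold Spec_get_space_tokenized_text get_space_tokenized_text get_space_tokenized_text_alt
  exact pyAloop_eq_reFindall text.toList.length text.toList le_rfl
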